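-- pv_equiv track=rewrite | github.com/alanqamarqo-dev/your-repo | AGL_NextGen/artifacts/sandbox/gate_04dd31ad-f696-467d-8db4-084b919454a8/src/agl/engines/self_improvement/Self_Improvement/Knowledge_Graph.py | _infer_domains_from_name
-- ===== SOURCE A (Python) =====
-- def _infer_domains_from_name(n: str):
-- 	k = (n or '').lower()
-- 	if any(s in k for s in ("math","algebra","calc","optimiz")): return ("math","analysis")
-- 	if any(s in k for s in ("proof","logic","verify","checker")): return ("reasoning","verification")
-- 	if any(s in k for s in ("summar","translate","nlp","lang")):  return ("language","nlp")
-- 	if any(s in k for s in ("vision","image","visual")):          return ("perception","visual")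
-- 	if any(s in k for s in ("audio","voice","speech")):           return ("perception","audio")
-- 	if any(s in k for s in ("sensor","telemetry","signal")):      return ("perception","sensor")
-- 	if any(s in k for s in ("plan","schedule","policy","design")):return ("planning","policy")
-- 	if any(s in k for s in ("retriev","search","mapper","router")):return ("knowledge","routing")
-- 	if any(s in k for s in ("critic","review","judge","safety","ethic","privacy","security")):
-- 		return ("governance","safety")
-- 	if any(s in k for s in ("gen_creativity","creative","story","idea")):
-- 		return ("creativity","synthesis")
-- 	return ("generic",)
-- ===== SOURCE B (Python) =====
-- _KEYWORDS = ("math", "algebra", "calc", "optimiz",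
--              "proof", "logic", "verify", "checker",
--              "summar", "translate", "nlp", "lang",
--              "vision", "image", "visual",
--              "audio", "voice", "speech",
--              "sensor", "telemetry", "signal",
--              "plan", "schedule", "policy", "design",
--              "retriev", "search", "mapper", "router",
--              "critic", "review", "judge", "safety", "ethic", "privacy", "security",
--              "gen_creativity", "creative", "story", "idea")
--
-- _RESULTS = ((("math", "analysis"),) * 4
--             + (("reasoning", "verification"),) * 4
--             + (("language", "nlp"),) * 4
--             + (("perception", "visual"),) * 3
--             + (("perception", "audio"),) * 3
--             + (("perception", "sensor"),) * 3
--             + (("planning", "policy"),) * 4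
--             + (("knowledge", "routing"),) * 4
--             + (("governance", "safety"),) * 7
--             + (("creativity", "synthesis"),) * 4)
--
--
-- def _match_at(key, i):
--     """Priority index of the first keyword starting at position i, else len(_KEYWORDS)."""
--     for j, kw in enumerate(_KEYWORDS):
--         if key.startswith(kw, i):
--             return j
--     return len(_KEYWORDS)
--
--
-- def _infer_domains_from_name(n: str):
--     # Position-driven scan: walk the name once position by position and keep the
--     # best (smallest) priority of any keyword that starts there.
--     key = (n or '').lower()
--     best = len(_KEYWORDS)
--     for i in range(len(key)):
--         j = _match_at(key, i)
--         if j < best: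
--             best = j
--     return _RESULTS[best] if best < len(_KEYWORDS) else ("generic",)
-- ===== Notes on version B (the rewrite author's own statement) =====
-- stated objective: alternative
-- what changed: Replaced A's rule-driven chain of any(substring) tests with a position-driven scan: walk the lowercased name once position by position, take the first keyword starting at each position, and keep the minimum priority index across positions.
import Mathlib
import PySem

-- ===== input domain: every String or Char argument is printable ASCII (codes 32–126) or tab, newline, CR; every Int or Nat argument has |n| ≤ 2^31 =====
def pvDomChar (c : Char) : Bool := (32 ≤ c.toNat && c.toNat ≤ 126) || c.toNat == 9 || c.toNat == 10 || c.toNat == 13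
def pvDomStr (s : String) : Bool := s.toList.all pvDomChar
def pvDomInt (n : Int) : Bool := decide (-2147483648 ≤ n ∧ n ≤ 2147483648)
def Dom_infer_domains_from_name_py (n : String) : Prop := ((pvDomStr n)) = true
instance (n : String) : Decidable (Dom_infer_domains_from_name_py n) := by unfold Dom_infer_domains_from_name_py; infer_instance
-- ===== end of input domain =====

-- B replaces A's rule-driven chain of any(substring) tests by a position-driven scan of the
-- lowercased name keeping the minimum-priority keyword starting at any position (objective: alternative).

-- ===== PORT A =====
def infer_domains_from_name_py (n : String) : List String :=
  let k := PySem.Str.lower (if n = "" then "" else n)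
  if ["math","algebra","calc","optimiz"].any (fun s => PySem.Str.isIn s k) then ["math","analysis"]
  else if ["proof","logic","verify","checker"].any (fun s => PySem.Str.isIn s k) then ["reasoning","verification"]
  else if ["summar","translate","nlp","lang"].any (fun s => PySem.Str.isIn s k) then ["language","nlp"]
  else if ["vision","image","visual"].any (fun s => PySem.Str.isIn s k) then ["perception","visual"]
  else if ["audio","voice","speech"].any (fun s => PySem.Str.isIn s k) then ["perception","audio"]
  else if ["sensor","telemetry","signal"].any (fun s => PySem.Str.isIn s k) then ["perception","sensor"]
  else if ["plan","schedule","policy","design"].any (fun s => PySem.Str.isIn s k) then ["planning","policy"]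
  else if ["retriev","search","mapper","router"].any (fun s => PySem.Str.isIn s k) then ["knowledge","routing"]
  else if ["critic","review","judge","safety","ethic","privacy","security"].any (fun s => PySem.Str.isIn s k) then ["governance","safety"]
  else if ["gen_creativity","creative","story","idea"].any (fun s => PySem.Str.isIn s k) then ["creativity","synthesis"]
  else ["generic"]

-- ===== PORT B =====
def pvKeywords : List String :=
  ["math","algebra","calc","optimiz","proof","logic","verify","checker",
   "summar","translate","nlp","lang","vision","image","visual",
   "audio","voice","speech","sensor","telemetry","signal",
   "plan","schedule","policy","design","retriev","search","mapper","router",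
   "critic","review","judge","safety","ethic","privacy","security",
   "gen_creativity","creative","story","idea"]

def pvResults : List (List String) :=
  [["math","analysis"],["math","analysis"],["math","analysis"],["math","analysis"],
   ["reasoning","verification"],["reasoning","verification"],["reasoning","verification"],["reasoning","verification"],
   ["language","nlp"],["language","nlp"],["language","nlp"],["language","nlp"],
   ["perception","visual"],["perception","visual"],["perception","visual"],
   ["perception","audio"],["perception","audio"],["perception","audio"],
   ["perception","sensor"],["perception","sensor"],["perception","sensor"],
   ["planning","policy"],["planning","policy"],["planning","policy"],["planning","policy"],
   ["knowledge","routing"],["knowledge","routing"],["knowledge","routing"],["knowledge","routing"],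
   ["governance","safety"],["governance","safety"],["governance","safety"],["governance","safety"],
   ["governance","safety"],["governance","safety"],["governance","safety"],
   ["creativity","synthesis"],["creativity","synthesis"],["creativity","synthesis"],["creativity","synthesis"]]

-- B's helper _match_at: enumerate loop carrying the running index j; Python's
-- key.startswith(kw, i) with 0 ≤ i is exactly startswith on the list dropped at i.
def pvMatchAt (key : List Char) (i : Nat) : List String → Nat → Nat
  | [], _ => pvKeywords.length
  | kw :: rest, j =>
      if PySem.Chars.startswith (key.drop i) kw.toList then j else pvMatchAt key i rest (j + 1)

def infer_domains_from_name_py_alt (n : String) : List String :=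
  let key := PySem.Str.lower (if n = "" then "" else n)
  let kl := key.toList
  let best := (List.range kl.length).foldl
      (fun best i => let j := pvMatchAt kl i pvKeywords 0; if j < best then j else best)
      pvKeywords.length
  -- the index best is < pvKeywords.length in the taken branch, so getD is exact here
  if best < pvKeywords.length then pvResults.getD best ["generic"] else ["generic"]

-- ===== PRECONDITION & SPEC =====
def Spec_infer_domains_from_name_py (n : String) (out : List String) : Prop := out = infer_domains_from_name_py_alt n
instance (n : String) (out : List String) : Decidable (Spec_infer_domains_from_name_py n out) := by unfold Spec_infer_domains_from_name_py; infer_instance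

-- ===== CLAIM (what is proved, stated in full; the proofs are below) =====
def Claim_equal_infer_domains_from_name_py : Prop := ∀ (n : String), Dom_infer_domains_from_name_py n → Spec_infer_domains_from_name_py n (infer_domains_from_name_py n)

-- ===== LEMMAS AND PROOFS =====

-- proof-side view of A: a flat first-match scan over the (keyword, result) table
def pvRulesL : List (String × List String) := pvKeywords.zip pvResults

def pvFirstMatch (key : String) : List (String × List String) → List String
  | [] => ["generic"]
  | (kw, r) :: rest => if PySem.Str.isIn kw key then r else pvFirstMatch key rest

theorem pv_ite_or {α : Type} (a b : Bool) (x y : α) :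
    (if (a || b) = true then x else y) = if a = true then x else if b = true then x else y := by
  cases a <;> cases b <;> simp

theorem pv_A_eq_firstMatch (n : String) :
    infer_domains_from_name_py n
      = pvFirstMatch (PySem.Str.lower (if n = "" then "" else n)) pvRulesL := by
  unfold infer_domains_from_name_py pvRulesL pvKeywords pvResults
  simp only [List.any_cons, List.any_nil, Bool.or_false, pv_ite_or, List.zip, List.zipWith,
    pvFirstMatch]

theorem pv_firstMatch_eq_getD (key : String) :
    ∀ (rules : List (String × List String)),
      pvFirstMatch key rules
        = (rules.map Prod.snd).getD (rules.findIdx (fun r => PySem.Str.isIn r.1 key)) ["generic"]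
  | [] => rfl
  | (kw, r) :: rest => by
      simp only [pvFirstMatch, List.findIdx_cons, List.map_cons]
      cases h : PySem.Str.isIn kw key <;>
        simp [pv_firstMatch_eq_getD key rest]

theorem pv_matchAt_eq (kl : List Char) (i : Nat) :
    ∀ (l : List String) (j : Nat), j + l.length = pvKeywords.length →
      pvMatchAt kl i l j
        = j + l.findIdx (fun kw => PySem.Chars.startswith (kl.drop i) kw.toList)
  | [], j, h => by simpa [pvMatchAt] using h.symm
  | kw :: rest, j, h => by
      simp only [pvMatchAt, List.findIdx_cons]
      cases hs : PySem.Chars.startswith (kl.drop i) kw.toList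
      · have := pv_matchAt_eq kl i rest (j + 1) (by simpa [Nat.add_comm, Nat.add_assoc, Nat.add_left_comm] using h)
        simp [this]
        omega
      · simp

theorem pv_foldl_le_init (f : Nat → Nat) :
    ∀ (l : List Nat) (a : Nat),
      l.foldl (fun b i => let j := f i; if j < b then j else b) a ≤ a
  | [], a => le_refl a
  | i :: rest, a => by
      simp only [List.foldl_cons]
      refine le_trans (pv_foldl_le_init f rest _) ?_
      by_cases h : f i < a <;> simp [h] <;> omega

theorem pv_foldl_le_mem (f : Nat → Nat) :
    ∀ (l : List Nat) (a : Nat) (i : Nat), i ∈ l →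
      l.foldl (fun b i => let j := f i; if j < b then j else b) a ≤ f i
  | [], _, _, hm => by cases hm
  | x :: rest, a, i, hm => by
      simp only [List.foldl_cons]
      rcases List.mem_cons.mp hm with h | h
      · subst h
        refine le_trans (pv_foldl_le_init f rest _) ?_
        by_cases h : f i < a <;> simp [h] <;> omega
      · exact pv_foldl_le_mem f rest _ i h

theorem pv_foldl_cases (f : Nat → Nat) :
    ∀ (l : List Nat) (a : Nat),
      l.foldl (fun b i => let j := f i; if j < b then j else b) a = a ∨
        ∃ i ∈ l, l.foldl (fun b i => let j := f i; if j < b then j else b) a = f i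
  | [], a => Or.inl rfl
  | x :: rest, a => by
      simp only [List.foldl_cons]
      rcases pv_foldl_cases f rest (let j := f x; if j < a then j else a) with h | ⟨i, hi, h⟩
      · by_cases hx : f x < a
        · exact Or.inr ⟨x, List.mem_cons_self, by simpa [hx] using h⟩
        · exact Or.inl (by simpa [hx] using h)
      · exact Or.inr ⟨i, List.mem_cons_of_mem _ hi, h⟩

theorem pv_findIdx_le_of_pred {α : Type} (p : α → Bool) (xs : List α) (j : Nat)
    (hj : j < xs.length) (h : p (xs[j]'hj) = true) : xs.findIdx p ≤ j := by
  by_contra hc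
  rw [Nat.not_le] at hc
  have hfalse := List.not_of_lt_findIdx hc
  exact absurd (h.symm.trans hfalse) (by decide)

theorem pv_keywords_toList_ne_nil : ∀ s ∈ pvKeywords, s.toList ≠ [] := by decide

-- main lemma: the position-driven min-fold computes the first-match keyword index
theorem pv_best_eq (key : String) :
    (List.range key.toList.length).foldl
        (fun best i => let j := pvMatchAt key.toList i pvKeywords 0; if j < best then j else best)
        pvKeywords.length
      = pvKeywords.findIdx (fun kw => PySem.Str.isIn kw key) := by
  set kl := key.toList with hkl
  set f : Nat → Nat := fun i => pvMatchAt kl i pvKeywords 0 with hf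
  set b := (List.range kl.length).foldl (fun best i => let j := f i; if j < best then j else best) pvKeywords.length with hb
  set m := pvKeywords.findIdx (fun kw => PySem.Str.isIn kw key) with hm
  have hfeq : ∀ i, f i = pvKeywords.findIdx (fun kw => PySem.Chars.startswith (kl.drop i) kw.toList) := by
    intro i
    simpa using pv_matchAt_eq kl i pvKeywords 0 (by simp)
  have hm_le : m ≤ pvKeywords.length := List.findIdx_le_length
  -- m ≤ b
  have h1 : m ≤ b := by
    rcases pv_foldl_cases f (List.range kl.length) pvKeywords.length with h | ⟨i, hi, h⟩
    · rw [hb, h]; exact hm_le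
    · rw [hb, h]
      by_cases hlt : f i < pvKeywords.length
      · have hq := hfeq i
        rw [hq] at hlt ⊢
        have hpred := @List.findIdx_getElem _ (fun kw => PySem.Chars.startswith (kl.drop i) kw.toList) pvKeywords hlt
        -- the keyword at that index starts at position i, hence occurs in key
        have hpre := (PySem.Chars.startswith_iff _ _).mp hpred
        have hisin := (PySem.Chars.exists_prefix_drop_iff_isIn _ kl).mp ⟨i, hpre⟩
        have hP : PySem.Str.isIn (pvKeywords[pvKeywords.findIdx (fun kw => PySem.Chars.startswith (kl.drop i) kw.toList)]'hlt) key = true := by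
          rw [PySem.Str.isIn_eq]; exact hisin
        exact pv_findIdx_le_of_pred _ pvKeywords _ hlt hP
      · omega
  -- b ≤ m
  have h2 : b ≤ m := by
    by_cases hmlt : m < pvKeywords.length
    · have hP := @List.findIdx_getElem _ (fun kw => PySem.Str.isIn kw key) pvKeywords hmlt
      have hmem : pvKeywords[m]'hmlt ∈ pvKeywords := List.getElem_mem _
      have hne := pv_keywords_toList_ne_nil _ hmem
      have hisin : PySem.Chars.isIn (pvKeywords[m]'hmlt).toList kl = true := by
        rw [← PySem.Str.isIn_eq]; exact hP
      rcases (PySem.Chars.exists_prefix_drop_iff_isIn _ kl).mpr hisin with ⟨j, hpre⟩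

      have hjlt : j < kl.length := by
        by_contra hge
        rw [Nat.not_lt] at hge
        rw [List.drop_eq_nil_of_le hge] at hpre
        exact hne (List.prefix_nil.mp hpre)
      have hQ : PySem.Chars.startswith (kl.drop j) (pvKeywords[m]'hmlt).toList = true :=
        (PySem.Chars.startswith_iff _ _).mpr hpre
      have hfj : f j ≤ m := by
        rw [hfeq]
        exact pv_findIdx_le_of_pred _ pvKeywords m hmlt hQ
      have hb_le : b ≤ f j :=
        pv_foldl_le_mem f (List.range kl.length) pvKeywords.length j (List.mem_range.mpr hjlt)
      omega
    · have : b ≤ pvKeywords.length := pv_foldl_le_init f (List.range kl.length) pvKeywords.length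
      omega
  omega

theorem pv_rules_map_snd : pvRulesL.map Prod.snd = pvResults := by decide

theorem pv_rules_findIdx (key : String) :
    pvRulesL.findIdx (fun r => PySem.Str.isIn r.1 key)
      = pvKeywords.findIdx (fun kw => PySem.Str.isIn kw key) := rfl

theorem pv_alt_eq (n : String) :
    infer_domains_from_name_py_alt n
      = pvResults.getD
          (pvKeywords.findIdx (fun kw => PySem.Str.isIn kw (PySem.Str.lower (if n = "" then "" else n))))
          ["generic"] := by
  unfold infer_domains_from_name_py_alt
  simp only [pv_best_eq]
  set m := pvKeywords.findIdx (fun kw => PySem.Str.isIn kw (PySem.Str.lower (if n = "" then "" else n))) with hm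
  by_cases h : m < pvKeywords.length
  · simp [h]
  · have hle : m ≤ pvKeywords.length := List.findIdx_le_length
    have hlen : pvResults.length ≤ m := by
      have : pvResults.length = pvKeywords.length := by decide
      omega
    simp [h, List.getElem?_eq_none hlen]

-- ===== VERDICT (by name: the statement is the Claim_ definition above) =====
theorem infer_domains_from_name_py_spec : Claim_equal_infer_domains_from_name_py := by
  intro n _
  unfold Spec_infer_domains_from_name_py
  rw [pv_A_eq_firstMatch, pv_firstMatch_eq_getD, pv_alt_eq, pv_rules_map_snd, pv_rules_findIdx]
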